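-- pv_equiv track=rewrite | github.com/koabula/VibeReading | backend/core/mineru.py | line_to_page
-- ===== SOURCE A (Python) =====
-- def line_to_page(line_number: int, page_map: dict[int, int]) -> int:
--     """Return the 1-based PDF page that contains *line_number*.
--
--     ``page_map`` is sparse (only page-boundary lines are stored).  We find the
--     largest stored key that is ≤ *line_number* and return its page value.
--     Falls back to page 1 if the map is empty.
--     """
--     if not page_map:
--         return 1
--     keys = sorted(page_map.keys())
--     result = page_map[keys[0]]
--     for k in keys:
--         if k <= line_number:
--             result = page_map[k]
--         else:
--             break
--     return result
-- ===== SOURCE B (Python) =====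
-- def line_to_page(line_number: int, page_map: dict[int, int]) -> int:
--     """Single linear pass: track the largest key <= line_number and the
--     smallest key overall; no sorting."""
--     if not page_map:
--         return 1
--     best = None
--     smallest = None
--     for k in page_map:
--         if k <= line_number and (best is None or k > best):
--             best = k
--         if smallest is None or k < smallest:
--             smallest = k
--     return page_map[best if best is not None else smallest]
-- ===== Notes on version B (the rewrite author's own statement) =====
-- stated objective: faster
-- what changed: Replaced A's sort-the-keys-then-scan-until-break with a single unsorted linear pass that tracks the largest key <= line_number and the smallest key overall (the fallback when line_number is below every key).
import Mathlib
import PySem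

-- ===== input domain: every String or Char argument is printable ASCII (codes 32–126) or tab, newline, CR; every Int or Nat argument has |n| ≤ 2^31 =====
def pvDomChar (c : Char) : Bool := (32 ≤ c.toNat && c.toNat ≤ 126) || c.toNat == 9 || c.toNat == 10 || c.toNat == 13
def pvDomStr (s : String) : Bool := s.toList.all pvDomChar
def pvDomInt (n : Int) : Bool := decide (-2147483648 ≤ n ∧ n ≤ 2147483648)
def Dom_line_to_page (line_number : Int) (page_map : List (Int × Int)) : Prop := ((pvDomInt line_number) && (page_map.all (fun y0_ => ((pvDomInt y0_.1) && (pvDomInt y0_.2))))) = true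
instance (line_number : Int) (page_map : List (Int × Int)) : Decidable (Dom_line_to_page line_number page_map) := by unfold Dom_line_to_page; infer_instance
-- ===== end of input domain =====

-- B replaces A's sort-then-scan by a single linear pass tracking the largest key ≤ line_number
-- (falling back to the smallest key), removing the sort (objective: faster, O(n) vs O(n log n)).

-- ===== PORT A =====
-- A's `for k in keys: if k <= line_number: result = page_map[k] else: break` loop.
def lineScanA (line_number : Int) (d : PySem.Dict Int Int) : List Int → Int → Int
  | [], result => result
  | k :: ks, result =>
    if k ≤ line_number then lineScanA line_number d ks (d.getD k 0) else result

def line_to_page (line_number : Int) (page_map : List (Int × Int)) : Int :=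
  let d : PySem.Dict Int Int := PySem.Dict.ofList page_map
  if page_map.isEmpty then 1
  else
    let keys := PySem.List.sorted d.keys (fun k => k)
    match keys with
    | [] => 1  -- unreachable: page_map ≠ [] so d has a key (keys[0] cannot raise)
    | k0 :: _ => lineScanA line_number d keys (d.getD k0 0)  -- k ∈ d.keys, so d[k] never raises

-- ===== PORT B =====
-- `if k <= line_number and (best is None or k > best): best = k`
def bestUpd (line_number : Int) (best : Option Int) (k : Int) : Option Int :=
  match best with
  | none => if k ≤ line_number then some k else none
  | some b => if k ≤ line_number ∧ b < k then some k else some b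

-- `if smallest is None or k < smallest: smallest = k`
def smallUpd (smallest : Option Int) (k : Int) : Option Int :=
  match smallest with
  | none => some k
  | some s => if k < s then some k else some s

def line_to_page_alt (line_number : Int) (page_map : List (Int × Int)) : Int :=
  let d : PySem.Dict Int Int := PySem.Dict.ofList page_map
  if page_map.isEmpty then 1
  else
    let st := d.keys.foldl (fun st k => (bestUpd line_number st.1 k, smallUpd st.2 k))
      ((none : Option Int), (none : Option Int))
    match st.1 with
    | some b => d.getD b 0                -- best is a key of d, lookup never raises
    | none => d.getD (st.2.getD 0) 0      -- smallest is `some` (loop ran over ≥ 1 key)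

-- ===== PRECONDITION & SPEC =====
def Spec_line_to_page (line_number : Int) (page_map : List (Int × Int)) (out : Int) : Prop := out = line_to_page_alt line_number page_map
instance (line_number : Int) (page_map : List (Int × Int)) (out : Int) : Decidable (Spec_line_to_page line_number page_map out) := by unfold Spec_line_to_page; infer_instance

-- ===== CLAIM (what is proved, stated in full; the proofs are below) =====
def Claim_equal_line_to_page : Prop := ∀ (line_number : Int) (page_map : List (Int × Int)), Dom_line_to_page line_number page_map → Spec_line_to_page line_number page_map (line_to_page line_number page_map)

-- ===== LEMMAS AND PROOFS =====

-- A's break-loop over a sorted key list is the fold over the filtered keys.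
theorem lineScanA_eq_filter (ln : Int) (d : PySem.Dict Int Int) :
    ∀ (ks : List Int) (r : Int), ks.Pairwise (· ≤ ·) →
      lineScanA ln d ks r
        = (ks.filter (fun k => decide (k ≤ ln))).foldl (fun _ k => d.getD k 0) r
  | [], _, _ => rfl
  | k :: ks, r, h => by
    rcases List.pairwise_cons.mp h with ⟨hle, htail⟩
    by_cases hk : k ≤ ln
    · simp only [lineScanA, if_pos hk, List.filter_cons, decide_eq_true hk]
      exact lineScanA_eq_filter ln d ks _ htail
    · have hnil : ks.filter (fun k => decide (k ≤ ln)) = [] := by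
        rw [List.filter_eq_nil_iff]
        intro a ha
        have := hle a ha
        simp only [decide_eq_true_eq]
        omega
      simp [lineScanA, hk, hnil]

-- A fold that ignores its accumulator returns g of the last element.
theorem foldl_const_last (g : Int → Int) :
    ∀ (l : List Int) (r : Int),
      l.foldl (fun _ k => g k) r = l.getLast?.elim r g
  | [], _ => rfl
  | x :: t, r => by
    rw [List.foldl_cons, foldl_const_last g t (g x)]
    cases t with
    | nil => rfl
    | cons y t' =>
      rw [List.getLast?_cons_cons]
      cases hm : (y :: t').getLast? with
      | none => exact absurd (List.getLast?_eq_none_iff.mp hm) (by simp)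
      | some m => rfl

-- On a ≤-sorted list, the last element is the (first) maximum.
theorem getLast?_eq_max? :
    ∀ (l : List Int), l.Pairwise (· ≤ ·) →
      l.getLast? = PySem.List.max? l (fun y => y)
  | [], _ => by simp [PySem.List.max?]
  | [x], _ => by simp [PySem.List.max?_id_cons]
  | x :: y :: t, h => by
    have hxy : x ≤ y := (List.pairwise_cons.mp h).1 y (by simp)
    have ih := getLast?_eq_max? (y :: t) (List.pairwise_cons.mp h).2
    rw [PySem.List.max?_id_cons] at ih ⊢
    rw [List.getLast?_cons_cons, ih]
    simp only [List.foldl_cons]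
    rw [max_eq_right hxy]

theorem foldl_min_eq_self :
    ∀ (t : List Int) (a : Int), (∀ y ∈ t, a ≤ y) → t.foldl min a = a
  | [], _, _ => rfl
  | y :: t, a, h => by
    rw [List.foldl_cons, min_eq_left (h y (by simp))]
    exact foldl_min_eq_self t a (fun z hz => h z (by simp [hz]))

-- max?/min? with the identity key depend only on the multiset of elements.
theorem max?_perm {l₁ l₂ : List Int} (h : l₁.Perm l₂) :
    PySem.List.max? l₁ (fun y => y) = PySem.List.max? l₂ (fun y => y) := by
  cases h₁ : PySem.List.max? l₁ (fun y => y) with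
  | none =>
    rw [PySem.List.max?_eq_none_iff] at h₁
    rw [eq_comm, PySem.List.max?_eq_none_iff]
    exact (h₁ ▸ h).symm.eq_nil
  | some m =>
    cases h₂ : PySem.List.max? l₂ (fun y => y) with
    | none =>
      rw [PySem.List.max?_eq_none_iff] at h₂
      rw [h₂] at h
      simp [h.eq_nil, PySem.List.max?] at h₁
    | some m' =>
      have hm := PySem.List.max?_mem h₁
      have hm' := PySem.List.max?_mem h₂
      have h1 := PySem.List.max?_isMax h₁ m' (h.mem_iff.mpr hm')
      have h2 := PySem.List.max?_isMax h₂ m (h.mem_iff.mp hm)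
      exact congrArg some (le_antisymm h2 h1)

theorem min?_perm {l₁ l₂ : List Int} (h : l₁.Perm l₂) :
    PySem.List.min? l₁ (fun y => y) = PySem.List.min? l₂ (fun y => y) := by
  cases h₁ : PySem.List.min? l₁ (fun y => y) with
  | none =>
    rw [PySem.List.min?_eq_none_iff] at h₁
    rw [eq_comm, PySem.List.min?_eq_none_iff]
    exact (h₁ ▸ h).symm.eq_nil
  | some m =>
    cases h₂ : PySem.List.min? l₂ (fun y => y) with
    | none =>
      rw [PySem.List.min?_eq_none_iff] at h₂
      rw [h₂] at h
      simp [h.eq_nil, PySem.List.min?] at h₁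
    | some m' =>
      have hm := PySem.List.min?_mem h₁
      have hm' := PySem.List.min?_mem h₂
      have h1 := PySem.List.min?_isMin h₁ m' (h.mem_iff.mpr hm')
      have h2 := PySem.List.min?_isMin h₂ m (h.mem_iff.mp hm)
      exact congrArg some (le_antisymm h1 h2)

theorem bestUpd_eq (ln : Int) (b : Option Int) (k : Int) :
    bestUpd ln b k = if k ≤ ln then some (b.elim k (fun bb => max bb k)) else b := by
  cases b with
  | none => rfl
  | some bb =>
    by_cases hk : k ≤ ln
    · by_cases hbb : bb < k
      · simp [bestUpd, hk, hbb, max_eq_right (le_of_lt hbb)]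
      · simp [bestUpd, hk, hbb, max_eq_left (by omega : k ≤ bb)]
    · simp [bestUpd, hk]

theorem smallUpd_eq (s : Option Int) (k : Int) :
    smallUpd s k = some (s.elim k (fun ss => min ss k)) := by
  cases s with
  | none => rfl
  | some ss =>
    by_cases h : k < ss
    · simp [smallUpd, h, min_eq_right (le_of_lt h)]
    · simp [smallUpd, h, min_eq_left (by omega : ss ≤ k)]

theorem foldl_omax_some :
    ∀ (l : List Int) (a : Int),
      l.foldl (fun b k => some (Option.elim b k (fun bb => max bb k))) (some a)
        = some (l.foldl max a)
  | [], _ => rfl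
  | k :: t, a => by
    rw [List.foldl_cons, List.foldl_cons]
    exact foldl_omax_some t (max a k)

theorem foldl_omin_some :
    ∀ (l : List Int) (a : Int),
      l.foldl (fun s k => some (Option.elim s k (fun ss => min ss k))) (some a)
        = some (l.foldl min a)
  | [], _ => rfl
  | k :: t, a => by
    rw [List.foldl_cons, List.foldl_cons]
    exact foldl_omin_some t (min a k)

-- B's `best` accumulator computes the maximum of the keys ≤ line_number.
theorem foldl_bestUpd (ln : Int) (l : List Int) :
    l.foldl (bestUpd ln) none
      = PySem.List.max? (l.filter (fun k => decide (k ≤ ln))) (fun y => y) := by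
  have h1 : l.foldl (bestUpd ln) none
      = l.foldl (fun b k => if k ≤ ln then some (Option.elim b k (fun bb => max bb k)) else b) none :=
    PySem.List.foldl_congr_mem _ _ _ _ (fun acc x _ => bestUpd_eq ln acc x)
  rw [h1, PySem.List.foldl_ite_eq_foldl_filter (p := fun k => k ≤ ln)
    (f := fun b k => some (Option.elim b k (fun bb => max bb k)))]
  cases hf : l.filter (fun k => decide (k ≤ ln)) with
  | nil => simp [PySem.List.max?]
  | cons x t =>
    rw [List.foldl_cons, PySem.List.max?_id_cons]
    exact foldl_omax_some t x

-- B's `smallest` accumulator computes the minimum of all keys.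
theorem foldl_smallUpd (l : List Int) :
    l.foldl smallUpd none = PySem.List.min? l (fun y => y) := by
  have h1 : l.foldl smallUpd none
      = l.foldl (fun s k => some (Option.elim s k (fun ss => min ss k))) none :=
    PySem.List.foldl_congr_mem _ _ _ _ (fun acc x _ => smallUpd_eq acc x)
  rw [h1]
  cases l with
  | nil => simp [PySem.List.min?]
  | cons x t =>
    rw [List.foldl_cons, PySem.List.min?_id_cons]
    exact foldl_omin_some t x

-- ===== VERDICT (by name: the statement is the Claim_ definition above) =====
theorem line_to_page_spec : Claim_equal_line_to_page := by
  intro ln pm _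
  unfold Spec_line_to_page line_to_page line_to_page_alt
  cases pm with
  | nil => rfl
  | cons p ps =>
    simp only [List.isEmpty_cons, Bool.false_eq_true, if_false]
    set d : PySem.Dict Int Int := PySem.Dict.ofList (p :: ps) with hd
    -- the keys of d are the distinct first components, in particular p.1 ∈ d.keys
    have hkeys : d.keys = PySem.Set.ofList ((p :: ps).map Prod.fst) := by
      rw [hd]
      show (List.foldl (fun acc q => acc.insert q.1 q.2) PySem.Dict.empty (p :: ps)).keys = _
      rw [PySem.Dict.keys_foldl_insert_key (p :: ps) Prod.fst (fun _ q => q.2) PySem.Dict.empty,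
        PySem.Dict.keys_empty]
      rfl
    have hKne : d.keys ≠ [] := by
      intro hnil
      have : p.1 ∈ d.keys := by
        rw [hkeys, PySem.Set.mem_ofList]
        simp
      rw [hnil] at this
      exact absurd this (List.not_mem_nil)
    -- the sorted key list
    have hSne : PySem.List.sorted d.keys (fun k => k) ≠ [] := by
      intro hnil
      exact hKne ((PySem.List.sorted_eq_nil_iff d.keys (fun k => k) false).mp hnil)
    obtain ⟨k0, rest, hS⟩ := List.exists_cons_of_ne_nil hSne
    have hperm : (PySem.List.sorted d.keys (fun k => k)).Perm d.keys :=
      PySem.List.sorted_perm d.keys (fun k => k) false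
    have hpw : (PySem.List.sorted d.keys (fun k => k)).Pairwise (· ≤ ·) :=
      PySem.List.sorted_pairwise d.keys (fun k => k)
    -- A's side: break-loop over the sorted keys → last element of the filtered sorted keys
    rw [hS]
    show lineScanA ln d (k0 :: rest) (d.getD k0 0) = _
    rw [lineScanA_eq_filter ln d (k0 :: rest) (d.getD k0 0) (hS ▸ hpw)]
    rw [foldl_const_last]
    -- B's side: split the paired fold into the two accumulators
    rw [PySem.List.foldl_prod_mk (f := fun b k => bestUpd ln b k) (g := fun s k => smallUpd s k)]
    rw [foldl_bestUpd, foldl_smallUpd]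
    -- smallest = head of the sorted keys
    have hmin : PySem.List.min? d.keys (fun y => y) = some k0 := by
      rw [min?_perm hperm.symm, hS, PySem.List.min?_id_cons,
        foldl_min_eq_self rest k0 (fun y hy => List.rel_of_pairwise_cons (hS ▸ hpw) hy)]
    -- best = last of the filtered sorted keys
    have hmax : PySem.List.max? (d.keys.filter (fun k => decide (k ≤ ln))) (fun y => y)
        = ((k0 :: rest).filter (fun k => decide (k ≤ ln))).getLast? := by
      rw [max?_perm ((hperm.filter (fun k => decide (k ≤ ln))).symm), hS]
      exact (getLast?_eq_max? _ ((hS ▸ hpw).filter _)).symm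
    rw [hmax, hmin]
    cases hlast : ((k0 :: rest).filter (fun k => decide (k ≤ ln))).getLast? with
    | none => simp
    | some m => simp
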